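-- pv_equiv track=rewrite | github.com/NJUNLP/CoP | utils/process.py | filter_none
-- ===== SOURCE A (Python) =====
-- def filter_none(not_in_source,score,label):
--     p_n = []
--     p_s = []
--     p_l = []
--     for i,j,k in zip(not_in_source,score,label):
--         if j is not None:
--             p_n.append(i)
--             p_s.append(j)
--             p_l.append(k)
--     return p_n,p_s,p_l
-- ===== SOURCE B (Python) =====
-- def filter_none(not_in_source, score, label):
--     n = min(len(not_in_source), len(score), len(label))
--     idx = [t for t in range(n) if score[t] is not None]
--     return ([not_in_source[t] for t in idx],
--             [score[t] for t in idx],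
--             [label[t] for t in idx])
-- ===== Notes on version B (the rewrite author's own statement) =====
-- stated objective: alternative
-- what changed: Replaces the single zip loop with interleaved appends by an index-based staged algorithm: first compute the list of kept positions (those below the minimum length whose score is not None), then build each of the three outputs by gathering the originals at those indices.
import Mathlib
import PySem

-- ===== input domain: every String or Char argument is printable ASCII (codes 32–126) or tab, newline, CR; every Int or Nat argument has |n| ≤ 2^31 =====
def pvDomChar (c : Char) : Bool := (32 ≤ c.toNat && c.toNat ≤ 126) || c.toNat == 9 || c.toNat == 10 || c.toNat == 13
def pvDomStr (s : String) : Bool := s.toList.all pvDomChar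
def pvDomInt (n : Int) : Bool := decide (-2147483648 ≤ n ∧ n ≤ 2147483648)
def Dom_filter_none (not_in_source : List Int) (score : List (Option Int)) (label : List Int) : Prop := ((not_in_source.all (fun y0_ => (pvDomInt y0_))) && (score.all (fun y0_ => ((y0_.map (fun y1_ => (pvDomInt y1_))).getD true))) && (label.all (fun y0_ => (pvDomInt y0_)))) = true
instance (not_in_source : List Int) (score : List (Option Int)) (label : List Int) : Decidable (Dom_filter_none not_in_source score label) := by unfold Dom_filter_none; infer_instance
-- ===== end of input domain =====

-- B replaces the single zip loop by an index-based staged algorithm: kept positions first, then three gathers (alternative, same cost).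

-- ===== PORT A =====
-- zip of three lists, truncating to the shortest (Python's zip)
def pvZip3 : List Int → List (Option Int) → List Int → List (Int × Option Int × Int)
  | i :: ns, j :: ss, k :: ls => (i, j, k) :: pvZip3 ns ss ls
  | _, _, _ => []

def filter_none (not_in_source : List Int) (score : List (Option Int)) (label : List Int) : List Int × List Int × List Int :=
  (pvZip3 not_in_source score label).foldl
    (fun st t =>
      match t.2.1 with
      | some j => (st.1 ++ [t.1], st.2.1 ++ [j], st.2.2 ++ [t.2.2])
      | none => st)
    ([], [], [])

-- ===== PORT B =====
-- indices t < n are in range of all three lists, so Python's xs[t] is List.getD;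
-- score[t] inside the gathers is not None (t was kept), so the extra `.getD 0` default is never taken
def filter_none_alt (not_in_source : List Int) (score : List (Option Int)) (label : List Int) : List Int × List Int × List Int :=
  let n := min (min not_in_source.length score.length) label.length
  let idx := (List.range n).filter (fun t => score.getD t none ≠ none)
  (idx.map (fun t => not_in_source.getD t 0),
   idx.map (fun t => (score.getD t none).getD 0),
   idx.map (fun t => label.getD t 0))

-- ===== PRECONDITION & SPEC =====
def Spec_filter_none (not_in_source : List Int) (score : List (Option Int)) (label : List Int) (out : List Int × List Int × List Int) : Prop := out = filter_none_alt not_in_source score label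
instance (not_in_source : List Int) (score : List (Option Int)) (label : List Int) (out : List Int × List Int × List Int) : Decidable (Spec_filter_none not_in_source score label out) := by unfold Spec_filter_none; infer_instance

-- ===== CLAIM (what is proved, stated in full; the proofs are below) =====
def Claim_equal_filter_none : Prop := ∀ (not_in_source : List Int) (score : List (Option Int)) (label : List Int), Dom_filter_none not_in_source score label → Spec_filter_none not_in_source score label (filter_none not_in_source score label)

-- ===== LEMMAS AND PROOFS =====

-- A's foldl with three appends, expressed through the kept triples of pvZip3
theorem pv_foldl_kept (xs : List (Int × Option Int × Int)) (a b c : List Int) :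
    xs.foldl
      (fun st t =>
        match t.2.1 with
        | some j => (st.1 ++ [t.1], st.2.1 ++ [j], st.2.2 ++ [t.2.2])
        | none => st)
      (a, b, c)
    = (a ++ (xs.filterMap (fun t => t.2.1.map (fun j => (t.1, j, t.2.2)))).map (·.1),
       b ++ (xs.filterMap (fun t => t.2.1.map (fun j => (t.1, j, t.2.2)))).map (·.2.1),
       c ++ (xs.filterMap (fun t => t.2.1.map (fun j => (t.1, j, t.2.2)))).map (·.2.2)) := by
  induction xs generalizing a b c with
  | nil => simp
  | cons t xs ih =>
    rcases t with ⟨i, j, k⟩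
    cases j with
    | none => simp [List.foldl, ih]
    | some j => simp [List.foldl, ih]

-- B's index-based gathers, expressed through the same kept triples
theorem pv_alt_kept : ∀ (ns : List Int) (sc : List (Option Int)) (lb : List Int),
    filter_none_alt ns sc lb
    = (((pvZip3 ns sc lb).filterMap (fun t => t.2.1.map (fun j => (t.1, j, t.2.2)))).map (·.1),
       ((pvZip3 ns sc lb).filterMap (fun t => t.2.1.map (fun j => (t.1, j, t.2.2)))).map (·.2.1),
       ((pvZip3 ns sc lb).filterMap (fun t => t.2.1.map (fun j => (t.1, j, t.2.2)))).map (·.2.2))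
  | [], sc, lb => by simp [filter_none_alt, pvZip3]
  | i :: ns, [], lb => by simp [filter_none_alt, pvZip3]
  | i :: ns, j :: sc, [] => by simp [filter_none_alt, pvZip3]
  | i :: ns, j :: sc, k :: lb => by
    have ih := pv_alt_kept ns sc lb
    simp only [filter_none_alt] at ih ⊢
    simp only [pvZip3, List.length_cons, Nat.succ_min_succ, List.range_succ_eq_map,
      List.filter_cons, List.filter_map]
    cases j with
    | none =>
      simp only [List.getD_cons_zero] at ih ⊢
      simpa using ih
    | some j =>
      simp only [List.getD_cons_zero] at ih ⊢
      simp only [List.filterMap_cons, Option.map_some, List.map_cons]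
      simpa [Function.comp] using ih

-- ===== VERDICT (by name: the statement is the Claim_ definition above) =====
theorem filter_none_spec : Claim_equal_filter_none := by
  intro ns sc lb _
  unfold Spec_filter_none
  rw [pv_alt_kept]
  unfold filter_none
  rw [pv_foldl_kept]
  simp
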